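-- pv_equiv track=rewrite | github.com/lilfetz22/linkedIn-post-automation-multi-agent | agents/reviewer_agent.py | _remove_hashtags
-- ===== SOURCE A (Python) =====
-- def _remove_hashtags(text: str) -> str:
--     """Remove hashtag lines from end of post.
--
--     Removes lines that start with # after the final content paragraph.
--     """
--     lines = text.split("\n")
--
--     # Find last non-empty, non-hashtag line
--     last_content_idx = -1
--     for i in range(len(lines) - 1, -1, -1):
--         line = lines[i].strip()
--         if line and not line.startswith("#"):
--             last_content_idx = i
--             break
--
--     # Keep everything up to and including last content line
--     if last_content_idx >= 0:
--         return "\n".join(lines[: last_content_idx + 1])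
--
--     return text
-- ===== SOURCE B (Python) =====
-- def _remove_hashtags(text: str) -> str:
--     """Remove hashtag lines from end of post.
--
--     Works on the reversed line list: peel blank/hashtag lines off its front,
--     then reverse back and rejoin; no index bookkeeping at all.
--     """
--     rev = text.split("\n")[::-1]
--     while rev and (not rev[0].strip() or rev[0].strip().startswith("#")):
--         rev = rev[1:]
--     if rev:
--         return "\n".join(rev[::-1])
--     return text
-- ===== Notes on version B (the rewrite author's own statement) =====
-- stated objective: alternative
-- what changed: Instead of scanning indices backward to find the last content line and slicing there, B reverses the line list, peels blank/hashtag lines off its front (a dropwhile on values, no indices), and reverses back.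
import Mathlib
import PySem

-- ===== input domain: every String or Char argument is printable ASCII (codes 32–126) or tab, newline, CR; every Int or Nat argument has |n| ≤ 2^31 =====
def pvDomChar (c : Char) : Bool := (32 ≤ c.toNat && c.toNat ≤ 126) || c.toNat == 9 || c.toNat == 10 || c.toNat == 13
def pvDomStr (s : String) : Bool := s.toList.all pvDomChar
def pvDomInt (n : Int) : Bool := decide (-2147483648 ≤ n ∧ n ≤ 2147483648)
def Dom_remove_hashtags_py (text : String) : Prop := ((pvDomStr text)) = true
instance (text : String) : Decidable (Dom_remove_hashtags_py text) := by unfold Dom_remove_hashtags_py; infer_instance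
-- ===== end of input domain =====

-- B replaces A's backward index scan + slice with a dropwhile on the reversed line list (no indices); alternative decomposition, same cost.


-- ===== PORT A =====
-- text.split("\n"): split? is some for the literal non-empty separator "\n", so the getD default is never taken
def pvSplitNL (text : String) : List String := (PySem.Str.split? text "\n").getD []

-- A's backward scan with break: first index (counting down) whose stripped line is non-empty and not '#'-prefixed; -1 if none
def pvFindLastA (lines : List String) : List Int → Int
  | [] => -1
  | i :: rest =>
    let line := PySem.Str.strip (PySem.List.pyGetD lines i "")
    if line != "" && !(PySem.Str.startswith line "#") then i
    else pvFindLastA lines rest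

def remove_hashtags_py (text : String) : String :=
  let lines := pvSplitNL text
  let last_content_idx := pvFindLastA lines (PySem.List.pyRange (PySem.List.len lines - 1) (-1) (-1))
  if last_content_idx ≥ 0 then
    PySem.Str.join "\n" (PySem.List.slice lines none (some (last_content_idx + 1)))
  else text

-- ===== PORT B =====
-- the while-loop condition: a line is junk when its strip is empty or starts with '#'
def pvJunk (l : String) : Bool :=
  PySem.Str.strip l == "" || PySem.Str.startswith (PySem.Str.strip l) "#"

-- Source B's 'while rev and junk(rev[0]): rev = rev[1:]' as structural recursion on rev
def pvDropJunk : List String → List String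
  | [] => []
  | l :: rest => if pvJunk l then pvDropJunk rest else l :: rest

def remove_hashtags_py_alt (text : String) : String :=
  let rev := (pvSplitNL text).reverse    -- text.split("\n")[::-1]
  let kept := pvDropJunk rev
  if kept ≠ [] then PySem.Str.join "\n" kept.reverse else text

-- ===== PRECONDITION & SPEC =====
def Spec_remove_hashtags_py (text : String) (out : String) : Prop := out = remove_hashtags_py_alt text
instance (text : String) (out : String) : Decidable (Spec_remove_hashtags_py text out) := by unfold Spec_remove_hashtags_py; infer_instance

-- ===== CLAIM (what is proved, stated in full; the proofs are below) =====
def Claim_equal_remove_hashtags_py : Prop := ∀ (text : String), Dom_remove_hashtags_py text → Spec_remove_hashtags_py text (remove_hashtags_py text)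

-- ===== LEMMAS AND PROOFS =====

lemma pvFindLastA_append (xs : List String) (x : String) (is : List Int)
    (h : ∀ i ∈ is, 0 ≤ i ∧ i < (xs.length : Int)) :
    pvFindLastA (xs ++ [x]) is = pvFindLastA xs is := by
  induction is with
  | nil => rfl
  | cons i rest ih =>
    have hi := h i (by simp)
    have hget : PySem.List.pyGetD (xs ++ [x]) i "" = PySem.List.pyGetD xs i "" := by
      rw [PySem.List.pyGetD_eq_getElem (xs ++ [x]) "" hi.1 (by simp; omega),
          PySem.List.pyGetD_eq_getElem xs "" hi.1 hi.2]
      rw [List.getElem_append_left (by omega)]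
    simp only [pvFindLastA, hget]
    split
    · rfl
    · exact ih (fun j hj => h j (by simp [hj]))

-- A's condition is the negation of the junk predicate
lemma pvCond_eq_not_junk (x : String) :
    (PySem.Str.strip x != "" && !(PySem.Str.startswith (PySem.Str.strip x) "#")) = !pvJunk x := by
  simp [pvJunk, Bool.not_or, bne]

-- pvDropJunk is dropWhile
lemma pvDropJunk_eq_dropWhile (xs : List String) : pvDropJunk xs = xs.dropWhile pvJunk := by
  induction xs with
  | nil => rfl
  | cons l rest ih =>
    simp only [pvDropJunk, List.dropWhile_cons]
    split_ifs with h <;> simp [ih]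

-- A's backward scan result, in terms of B's dropped reversed list
lemma pvMain (xs : List String) :
    pvFindLastA xs ((PySem.List.pyRange 0 (xs.length : Int) 1).reverse)
      = ((pvDropJunk xs.reverse).length : Int) - 1 := by
  induction xs using List.reverseRecOn with
  | nil => simp [pvFindLastA, PySem.List.pyRange_one_eq_nil, pvDropJunk]
  | append_singleton xs x ih =>
    have h1 : ((xs ++ [x]).length : Int) = (xs.length : Int) + 1 := by simp
    rw [h1, PySem.List.pyRange_one_succ_right (Int.natCast_nonneg _)]
    rw [List.reverse_append]
    simp only [List.reverse_cons, List.reverse_nil, List.nil_append, List.singleton_append]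
    have hget : PySem.List.pyGetD (xs ++ [x]) (xs.length : Int) "" = x := by
      rw [PySem.List.pyGetD_eq_getElem (xs ++ [x]) "" (Int.natCast_nonneg _) (by simp)]
      simp
    have hmem : ∀ i ∈ (PySem.List.pyRange 0 (xs.length : Int) 1).reverse,
        0 ≤ i ∧ i < (xs.length : Int) := by
      intro i hi
      rw [List.mem_reverse, PySem.List.mem_pyRange_one] at hi
      exact hi
    have hrev : (xs ++ [x]).reverse = x :: xs.reverse := by simp
    simp only [pvFindLastA, hget, pvCond_eq_not_junk, hrev, pvDropJunk]
    by_cases hj : pvJunk x = true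
    · rw [if_pos hj]
      rw [pvFindLastA_append xs x _ hmem, ih]
      simp [hj]
    · rw [if_neg hj]
      simp only [Bool.not_eq_true] at hj
      simp [hj]

-- B's kept list, reversed, is the prefix of the lines of that length
lemma pvKept_reverse (xs : List String) :
    (pvDropJunk xs.reverse).reverse = xs.take (pvDropJunk xs.reverse).length := by
  rw [pvDropJunk_eq_dropWhile]
  have hsuf : xs.reverse.dropWhile pvJunk <:+ xs.reverse := List.dropWhile_suffix pvJunk
  have hpre : (xs.reverse.dropWhile pvJunk).reverse <+: xs := by
    have := List.reverse_prefix.mpr hsuf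
    rwa [List.reverse_reverse] at this
  rw [List.prefix_iff_eq_take] at hpre
  rw [hpre]
  simp

-- ===== VERDICT (by name: the statement is the Claim_ definition above) =====
theorem remove_hashtags_py_spec : Claim_equal_remove_hashtags_py := by
  intro text _
  unfold Spec_remove_hashtags_py remove_hashtags_py remove_hashtags_py_alt
  set xs := pvSplitNL text with hxs
  have hr : PySem.List.pyRange (PySem.List.len xs - 1) (-1) (-1)
      = (PySem.List.pyRange 0 (xs.length : Int) 1).reverse := by
    rw [PySem.List.pyRange_neg_one_eq_reverse]
    norm_num [PySem.List.len_eq]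
  simp only [hr, pvMain]
  cases hk : pvDropJunk xs.reverse with
  | nil => norm_num
  | cons y ys =>
    have hlen : (0 : Int) ≤ ((y :: ys).length : Int) - 1 := by simp
    rw [if_pos hlen, if_pos (by simp)]
    have h2 : ((y :: ys).length : Int) - 1 + 1 = ((y :: ys).length : Int) := by ring
    rw [h2, PySem.List.slice_to_natCast]
    congr 1
    have := pvKept_reverse xs
    rw [hk] at this
    exact this.symm
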